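-- pv_equiv track=rewrite | github.com/clestinepa/Python-Games | nonogram/domain/update_manager.py | buildAreas
-- ===== SOURCE A (Python) =====
-- from typing import Literal
--
-- def buildAreas(cells_to_check: list[Literal["EMPTY", "FILL", "CROSS"]]) -> tuple[list[int], int, int]:
--     areas = []
--     onArea = False
--     nb_cross = 0
--     nb_fill = 0
--     for cell in cells_to_check:
--         if cell == "FILL":
--             if not onArea:
--                 onArea = True
--                 areas.append(0)
--             areas[len(areas) - 1] += 1
--             nb_fill += 1
--         if cell == "CROSS":
--             onArea = False
--             nb_cross += 1
--             areas.append(0)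
--         if cell == "EMPTY":
--             onArea = False
--             areas.append(-1)
--     return areas, nb_cross, nb_fill
-- ===== SOURCE B (Python) =====
-- def buildAreas(cells_to_check):
--     # Run-based scan: process each maximal run of equally-categorised cells at once.
--     def cat(c):
--         return c if c in ("FILL", "CROSS", "EMPTY") else "OTHER"
--
--     areas = []
--     nb_cross = 0
--     nb_fill = 0
--     open_area = False
--     i, n = 0, len(cells_to_check)
--     while i < n:
--         k = cat(cells_to_check[i])
--         j = i + 1
--         while j < n and cat(cells_to_check[j]) == k:
--             j += 1
--         length = j - i
--         if k == "FILL":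
--             if open_area:
--                 areas[-1] += length
--             else:
--                 areas.append(length)
--                 open_area = True
--             nb_fill += length
--         elif k == "CROSS":
--             areas.extend([0] * length)
--             nb_cross += length
--             open_area = False
--         elif k == "EMPTY":
--             areas.extend([-1] * length)
--             open_area = False
--         i = j
--     return areas, nb_cross, nb_fill
-- ===== Notes on version B (the rewrite author's own statement) =====
-- stated objective: alternative
-- what changed: B replaces A's per-cell boolean state machine by a two-pointer scan over maximal runs of equally-categorised cells, handling each whole run in one step (one area entry per FILL run, length-many entries per CROSS/EMPTY run).
import Mathlib
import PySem

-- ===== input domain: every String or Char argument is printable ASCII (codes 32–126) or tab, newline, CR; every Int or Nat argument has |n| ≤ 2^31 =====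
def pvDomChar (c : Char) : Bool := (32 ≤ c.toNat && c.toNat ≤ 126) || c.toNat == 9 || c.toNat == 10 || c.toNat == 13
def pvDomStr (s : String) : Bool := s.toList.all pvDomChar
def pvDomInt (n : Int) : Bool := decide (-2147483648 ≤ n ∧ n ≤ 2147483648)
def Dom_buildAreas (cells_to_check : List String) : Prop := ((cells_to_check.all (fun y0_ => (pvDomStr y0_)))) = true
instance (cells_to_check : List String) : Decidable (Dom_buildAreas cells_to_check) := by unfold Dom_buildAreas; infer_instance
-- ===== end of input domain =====

-- B scans maximal runs of equally-categorised cells and handles each run in one step,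
-- instead of A's per-cell state-machine update; objective: alternative decomposition (same cost).

-- ===== PORT A =====
-- areas[len(areas)-1] += 1 : exact whenever areas ≠ [], which always holds at this point in A
-- (the FILL branch appends first when not onArea, and onArea implies a previous append).
def pvIncLast (areas : List Int) : List Int := areas.dropLast ++ [areas.getLastD 0 + 1]

def pvStepA (st : List Int × Bool × Int × Int) (cell : String) : List Int × Bool × Int × Int :=
  let (areas, onArea, nb_cross, nb_fill) := st
  -- if cell == "FILL":
  let (areas, onArea, nb_fill) :=
    if cell = "FILL" then
      let (areas, onArea) := if !onArea then (areas ++ [(0 : Int)], true) else (areas, onArea)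
      (pvIncLast areas, onArea, nb_fill + 1)
    else (areas, onArea, nb_fill)
  -- if cell == "CROSS":
  let (areas, onArea, nb_cross) :=
    if cell = "CROSS" then (areas ++ [(0 : Int)], false, nb_cross + 1)
    else (areas, onArea, nb_cross)
  -- if cell == "EMPTY":
  let (areas, onArea) :=
    if cell = "EMPTY" then (areas ++ [(-1 : Int)], false) else (areas, onArea)
  (areas, onArea, nb_cross, nb_fill)

def buildAreas (cells_to_check : List String) : List Int × Int × Int :=
  let (areas, _, nb_cross, nb_fill) :=
    cells_to_check.foldl pvStepA ([], false, (0 : Int), (0 : Int))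
  (areas, nb_cross, nb_fill)

-- ===== PORT B =====
-- cat(c): 0 = FILL, 1 = CROSS, 2 = EMPTY, 3 = OTHER
def pvCat (c : String) : Nat :=
  if c = "FILL" then 0 else if c = "CROSS" then 1 else if c = "EMPTY" then 2 else 3

-- the run-scanning while loop of Source B: each step consumes one maximal run
-- (areas[-1] += length : exact whenever areas ≠ [], which open_area guarantees)
def pvGoB (cs : List String) (areas : List Int) (nb_cross nb_fill : Int) (opn : Bool) :
    List Int × Int × Int :=
  match cs with
  | [] => (areas, nb_cross, nb_fill)
  | c :: rest =>
    let k := pvCat c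
    let run := rest.takeWhile (fun x => pvCat x == k)
    let rest' := rest.dropWhile (fun x => pvCat x == k)
    let L : Int := (run.length : Int) + 1
    if k = 0 then
      pvGoB rest' (if opn then areas.dropLast ++ [areas.getLastD 0 + L] else areas ++ [L])
        nb_cross (nb_fill + L) true
    else if k = 1 then
      pvGoB rest' (areas ++ List.replicate (run.length + 1) (0 : Int)) (nb_cross + L) nb_fill false
    else if k = 2 then
      pvGoB rest' (areas ++ List.replicate (run.length + 1) (-1 : Int)) nb_cross nb_fill false
    else
      pvGoB rest' areas nb_cross nb_fill opn
  termination_by cs.length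
  decreasing_by all_goals
    · simp only [List.length_cons]
      exact Nat.lt_succ_of_le (List.length_dropWhile_le _ _)

def buildAreas_alt (cells_to_check : List String) : List Int × Int × Int :=
  pvGoB cells_to_check [] 0 0 false

-- ===== PRECONDITION & SPEC =====
def Spec_buildAreas (cells_to_check : List String) (out : List Int × Int × Int) : Prop := out = buildAreas_alt cells_to_check
instance (cells_to_check : List String) (out : List Int × Int × Int) : Decidable (Spec_buildAreas cells_to_check out) := by unfold Spec_buildAreas; infer_instance

-- ===== CLAIM (what is proved, stated in full; the proofs are below) =====
def Claim_equal_buildAreas : Prop := ∀ (cells_to_check : List String), Dom_buildAreas cells_to_check → Spec_buildAreas cells_to_check (buildAreas cells_to_check)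

-- ===== LEMMAS AND PROOFS =====

theorem pvStepA_fill_true (areas : List Int) (cr f : Int) :
    pvStepA (areas, true, cr, f) "FILL" = (pvIncLast areas, true, cr, f + 1) := by
  simp [pvStepA]

theorem pvStepA_fill_false (areas : List Int) (cr f : Int) :
    pvStepA (areas, false, cr, f) "FILL" = (pvIncLast (areas ++ [0]), true, cr, f + 1) := by
  simp [pvStepA]

theorem pvStepA_cross (areas : List Int) (o : Bool) (cr f : Int) :
    pvStepA (areas, o, cr, f) "CROSS" = (areas ++ [0], false, cr + 1, f) := by
  simp [pvStepA]

theorem pvStepA_empty (areas : List Int) (o : Bool) (cr f : Int) :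
    pvStepA (areas, o, cr, f) "EMPTY" = (areas ++ [-1], false, cr, f) := by
  simp [pvStepA]

theorem pvStepA_other (st : List Int × Bool × Int × Int) (c : String)
    (h1 : c ≠ "FILL") (h2 : c ≠ "CROSS") (h3 : c ≠ "EMPTY") : pvStepA st c = st := by
  simp [pvStepA, h1, h2, h3]

theorem pvCat_eq_zero {c : String} : pvCat c = 0 ↔ c = "FILL" := by
  simp only [pvCat]; split_ifs <;> simp_all

theorem pvCat_eq_one {c : String} : pvCat c = 1 ↔ c = "CROSS" := by
  simp only [pvCat]; split_ifs <;> simp_all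

theorem pvCat_eq_two {c : String} : pvCat c = 2 ↔ c = "EMPTY" := by
  simp only [pvCat]; split_ifs <;> simp_all

theorem pvCat_eq_three {c : String} : pvCat c = 3 ↔ (c ≠ "FILL" ∧ c ≠ "CROSS" ∧ c ≠ "EMPTY") := by
  simp only [pvCat]; split_ifs <;> simp_all

-- a FILL run continuing an open area adds its length to the last area
theorem pvFoldFill (run : List String) (h : ∀ x ∈ run, x = "FILL") :
    ∀ (pre : List Int) (v cr f : Int),
      run.foldl pvStepA (pre ++ [v], true, cr, f)
        = (pre ++ [v + run.length], true, cr, f + run.length) := by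
  induction run with
  | nil => simp
  | cons c rest ih =>
    intro pre v cr f
    have hc : c = "FILL" := h c (by simp)
    have hrest : ∀ x ∈ rest, x = "FILL" := fun x hx => h x (by simp [hx])
    have hstep : pvIncLast (pre ++ [v]) = pre ++ [v + 1] := by simp [pvIncLast]
    rw [List.foldl_cons, hc, pvStepA_fill_true, hstep, ih hrest pre (v + 1) cr (f + 1)]
    simp only [List.length_cons]
    push_cast
    ring_nf

-- a CROSS run appends |run| zeros and counts them
theorem pvFoldCross (run : List String) (h : ∀ x ∈ run, x = "CROSS") :
    ∀ (areas : List Int) (cr f : Int),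
      run.foldl pvStepA (areas, false, cr, f)
        = (areas ++ List.replicate run.length (0 : Int), false, cr + run.length, f) := by
  induction run with
  | nil => simp
  | cons c rest ih =>
    intro areas cr f
    have hc : c = "CROSS" := h c (by simp)
    have hrest : ∀ x ∈ rest, x = "CROSS" := fun x hx => h x (by simp [hx])
    rw [List.foldl_cons, hc, pvStepA_cross, ih hrest (areas ++ [0]) (cr + 1) f]
    simp only [List.replicate_succ, List.length_cons, List.append_assoc, List.singleton_append]
    push_cast
    ring_nf

-- an EMPTY run appends |run| entries -1
theorem pvFoldEmpty (run : List String) (h : ∀ x ∈ run, x = "EMPTY") :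
    ∀ (areas : List Int) (cr f : Int),
      run.foldl pvStepA (areas, false, cr, f)
        = (areas ++ List.replicate run.length (-1 : Int), false, cr, f) := by
  induction run with
  | nil => simp
  | cons c rest ih =>
    intro areas cr f
    have hc : c = "EMPTY" := h c (by simp)
    have hrest : ∀ x ∈ rest, x = "EMPTY" := fun x hx => h x (by simp [hx])
    rw [List.foldl_cons, hc, pvStepA_empty, ih hrest (areas ++ [-1]) cr f]
    simp [List.replicate_succ]

-- cells of no recognised category leave A's state unchanged
theorem pvFoldOther (run : List String) (h : ∀ x ∈ run, pvCat x = 3) :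
    ∀ (st : List Int × Bool × Int × Int), run.foldl pvStepA st = st := by
  induction run with
  | nil => intro st; rfl
  | cons c rest ih =>
    intro st
    have hc := pvCat_eq_three.mp (h c (by simp))
    have hrest : ∀ x ∈ rest, pvCat x = 3 := fun x hx => h x (by simp [hx])
    rw [List.foldl_cons, pvStepA_other st c hc.1 hc.2.1 hc.2.2, ih hrest st]


-- the main correspondence between A's cell-by-cell fold and B's run loop
theorem pvMain (n : Nat) : ∀ (cs : List String), cs.length ≤ n →
    ∀ (areas : List Int) (cr f : Int) (opn : Bool), (opn = true → areas ≠ []) →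
      (fun st : List Int × Bool × Int × Int => (st.1, st.2.2.1, st.2.2.2))
          (cs.foldl pvStepA (areas, opn, cr, f))
        = pvGoB cs areas cr f opn := by
  induction n with
  | zero =>
    intro cs hlen areas cr f opn _
    have : cs = [] := List.length_eq_zero_iff.mp (Nat.le_zero.mp hlen)
    subst this; simp [pvGoB]
  | succ n ih =>
    intro cs hlen areas cr f opn hopn
    match cs with
    | [] => simp [pvGoB]
    | c :: rest =>
      set k := pvCat c with hk
      set run := rest.takeWhile (fun x => pvCat x == k) with hrun
      set rest' := rest.dropWhile (fun x => pvCat x == k) with hrest'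
      have hsplit : rest = run ++ rest' := (List.takeWhile_append_dropWhile).symm
      have hmem : ∀ x ∈ run, pvCat x = k := by
        intro x hx
        have := List.mem_takeWhile_imp (hrun ▸ hx)
        simpa using this
      have hlen' : rest'.length ≤ n := by
        have h1 : rest'.length ≤ rest.length := List.length_dropWhile_le _ _
        simp only [List.length_cons] at hlen; omega
      have hfold : (c :: rest).foldl pvStepA (areas, opn, cr, f)
          = rest'.foldl pvStepA (run.foldl pvStepA (pvStepA (areas, opn, cr, f) c)) := by
        rw [List.foldl_cons, hsplit, List.foldl_append]
      have hgo : pvGoB (c :: rest) areas cr f opn =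
          (if k = 0 then
            pvGoB rest' (if opn then areas.dropLast ++ [areas.getLastD 0 + ((run.length : Int) + 1)]
                        else areas ++ [(run.length : Int) + 1]) cr (f + ((run.length : Int) + 1)) true
          else if k = 1 then
            pvGoB rest' (areas ++ List.replicate (run.length + 1) (0 : Int))
              (cr + ((run.length : Int) + 1)) f false
          else if k = 2 then
            pvGoB rest' (areas ++ List.replicate (run.length + 1) (-1 : Int)) cr f false
          else pvGoB rest' areas cr f opn) := by
        rw [pvGoB]
      rw [hfold, hgo]
      by_cases h0 : k = 0
      · -- FILL run
        have hc : c = "FILL" := pvCat_eq_zero.mp (by rw [← hk]; exact h0)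
        have hmemF : ∀ x ∈ run, x = "FILL" := fun x hx => pvCat_eq_zero.mp (h0 ▸ hmem x hx)
        rw [if_pos h0, hc]
        cases opn with
        | false =>
          rw [pvStepA_fill_false]
          have : pvIncLast (areas ++ [0]) = areas ++ [(1 : Int)] := by simp [pvIncLast]
          rw [this, pvFoldFill run hmemF areas 1 cr (f + 1)]
          rw [if_neg (by decide)]
          have e1 : (1 : Int) + run.length = (run.length : Int) + 1 := by ring
          have e2 : f + 1 + (run.length : Int) = f + ((run.length : Int) + 1) := by ring
          rw [e1, e2]
          exact ih rest' hlen' _ _ _ true (fun _ => by simp)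
        | true =>
          have hne : areas ≠ [] := hopn rfl
          have hdec : areas = areas.dropLast ++ [areas.getLastD 0] := by
            conv_lhs => rw [← List.dropLast_append_getLast hne]
            rw [List.getLastD_eq_getLast?, List.getLast?_eq_some_getLast hne]; rfl
          rw [pvStepA_fill_true]
          have : pvIncLast areas = areas.dropLast ++ [areas.getLastD 0 + 1] := rfl
          rw [this, pvFoldFill run hmemF _ _ cr (f + 1)]
          rw [if_pos rfl]
          have e1 : areas.getLastD 0 + 1 + (run.length : Int)
              = areas.getLastD 0 + ((run.length : Int) + 1) := by ring
          have e2 : f + 1 + (run.length : Int) = f + ((run.length : Int) + 1) := by ring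
          rw [e1, e2]
          exact ih rest' hlen' _ _ _ true (fun _ => by simp)
      · by_cases h1 : k = 1
        · -- CROSS run
          have hc : c = "CROSS" := pvCat_eq_one.mp (by rw [← hk]; exact h1)
          have hmemC : ∀ x ∈ run, x = "CROSS" := fun x hx => pvCat_eq_one.mp (h1 ▸ hmem x hx)
          rw [if_neg h0, if_pos h1, hc, pvStepA_cross,
            pvFoldCross run hmemC (areas ++ [0]) (cr + 1) f]
          have e1 : areas ++ [(0 : Int)] ++ List.replicate run.length (0 : Int)
              = areas ++ List.replicate (run.length + 1) (0 : Int) := by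
            simp [List.replicate_succ]
          have e2 : cr + 1 + (run.length : Int) = cr + ((run.length : Int) + 1) := by ring
          rw [e1, e2]
          exact ih rest' hlen' _ _ _ false (by simp)
        · by_cases h2 : k = 2
          · -- EMPTY run
            have hc : c = "EMPTY" := pvCat_eq_two.mp (by rw [← hk]; exact h2)
            have hmemE : ∀ x ∈ run, x = "EMPTY" := fun x hx => pvCat_eq_two.mp (h2 ▸ hmem x hx)
            rw [if_neg h0, if_neg h1, if_pos h2, hc, pvStepA_empty,
              pvFoldEmpty run hmemE (areas ++ [-1]) cr f]
            have e1 : areas ++ [(-1 : Int)] ++ List.replicate run.length (-1 : Int)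
                = areas ++ List.replicate (run.length + 1) (-1 : Int) := by
              simp [List.replicate_succ]
            rw [e1]
            exact ih rest' hlen' _ _ _ false (by simp)
          · -- OTHER run: state unchanged
            have hall : pvCat c = 0 ∨ pvCat c = 1 ∨ pvCat c = 2 ∨ pvCat c = 3 := by
              simp only [pvCat]; split_ifs <;> simp
            have h3 : k = 3 := by
              rw [hk] at h0 h1 h2 ⊢
              rcases hall with h | h | h | h <;> omega
            have hcc := pvCat_eq_three.mp (by rw [← hk]; exact h3)
            have hmemO : ∀ x ∈ run, pvCat x = 3 := fun x hx => h3 ▸ hmem x hx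
            rw [if_neg h0, if_neg h1, if_neg h2,
              pvStepA_other _ c hcc.1 hcc.2.1 hcc.2.2, pvFoldOther run hmemO]
            exact ih rest' hlen' _ _ _ opn hopn

-- ===== VERDICT (by name: the statement is the Claim_ definition above) =====
theorem buildAreas_spec : Claim_equal_buildAreas := by
  intro cs _
  show buildAreas cs = buildAreas_alt cs
  have h := pvMain cs.length cs (le_refl _) [] 0 0 false (by simp)
  unfold buildAreas buildAreas_alt
  rw [← h]
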